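-- pv_equiv track=rewrite | github.com/titidutarn/hackerRank | Battleship_1_player.py | dfs_x
-- ===== SOURCE A (Python) =====
-- def dfs_x(grid, start):
--     visited, stack = set(), [start]
--     while stack:
--         vertex = stack.pop()
--         if vertex not in visited:
--             visited.add(vertex)
--             try :
--                 if grid[vertex[0]][vertex[1]+1]=='-' and vertex[1]+1<10:
--                     stack.extend([(vertex[0],vertex[1]+1)])
--             except:
--                 pass
--             try :
--                 if grid[vertex[0]][vertex[1]-1]=='-' and vertex[1]-1>=0:
--                     stack.extend([(vertex[0],vertex[1]-1)])
--             except: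
--                 pass
--     return visited
-- ===== SOURCE B (Python) =====
-- def dfs_x(grid, start):
--     # Two directed scans over the horizontal run instead of a stack DFS with a
--     # visited-membership test: walk left from start, then right, collecting cells.
--     r, c = start
--     cells = [start]
--     col = c - 1
--     while True:
--         try:
--             if not (grid[r][col] == '-' and col >= 0):
--                 break
--         except Exception:
--             break
--         cells.append((r, col))
--         col -= 1
--     col = c + 1
--     while True:
--         try:
--             if not (grid[r][col] == '-' and col < 10):
--                 break
--         except Exception:
--             break
--         cells.append((r, col))
--         col += 1
--     return set(cells)
-- ===== Notes on version B (the rewrite author's own statement) =====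
-- stated objective: simpler
-- what changed: Replaces the stack-based DFS with a visited set and junk re-pushes by two directed while-loops that walk the horizontal run left then right from start, collecting each cell exactly once.
import Mathlib
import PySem

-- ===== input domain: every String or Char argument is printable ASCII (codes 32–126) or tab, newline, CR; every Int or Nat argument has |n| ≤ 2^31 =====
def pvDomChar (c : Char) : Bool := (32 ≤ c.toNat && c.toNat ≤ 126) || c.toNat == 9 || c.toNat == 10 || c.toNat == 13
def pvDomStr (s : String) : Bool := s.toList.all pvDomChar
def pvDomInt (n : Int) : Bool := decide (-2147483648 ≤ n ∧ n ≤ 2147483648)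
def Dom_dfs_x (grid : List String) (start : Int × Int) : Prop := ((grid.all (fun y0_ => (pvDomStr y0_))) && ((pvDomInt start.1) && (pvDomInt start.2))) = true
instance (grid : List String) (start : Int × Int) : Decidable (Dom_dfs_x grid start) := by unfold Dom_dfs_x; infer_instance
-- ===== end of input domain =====

-- B replaces A's stack DFS (visited set, re-pushed neighbours) by two directed scans of
-- the horizontal run (left of start, then right) — simpler: no stack, no membership tests.
-- Both Pythons return a set; the two ports build the same insertion-order list.

-- ===== PORT A =====
-- grid[r][j] inside Python's bare try: none = any exception (row or column IndexError).


def pvCell (grid : List String) (r j : Int) : Option Char :=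
  match PySem.List.pyGet? grid r with
  | none => none
  | some s => PySem.Str.pyGet? s j

-- Termination measure for A's DFS loop, cited by `decreasing_by` in `dfsLoop`: every
-- cell the loop can push has the popped cell's row and a column bounded by the longest
-- row length + 10, so the pool of unvisited pushable cells strictly shrinks.

def pvRowMax (grid : List String) : Nat := grid.foldr (fun s m => max s.toList.length m) 0

def pvBound (grid : List String) : Int := (pvRowMax grid : Int) + 10

def pvCand (grid : List String) (stack : List (Int × Int)) : Finset (Int × Int) :=
  ((stack.map Prod.fst).toFinset) ×ˢ (PySem.List.pyRange (-(pvBound grid)) (pvBound grid + 1) 1).toFinset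

def pvPot (grid : List String) (v stack : List (Int × Int)) : Nat :=
  3 * ((pvCand grid stack ∪ stack.toFinset) \ v.toFinset).card + stack.length

theorem mem_pvCand {grid : List String} {stack : List (Int × Int)} {p : Int × Int} :
    p ∈ pvCand grid stack ↔
      p.1 ∈ stack.map Prod.fst ∧ -(pvBound grid) ≤ p.2 ∧ p.2 ≤ pvBound grid := by
  unfold pvCand
  simp [Finset.mem_product, PySem.List.mem_pyRange_one]

theorem pvRowMax_le {grid : List String} {s : String} (hs : s ∈ grid) :
    s.toList.length ≤ pvRowMax grid := by
  unfold pvRowMax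
  induction grid with
  | nil => cases hs
  | cons g gs ih =>
    rcases List.mem_cons.mp hs with h1 | h2
    · subst h1; rw [List.foldr_cons]; exact le_max_left _ _
    · rw [List.foldr_cons]; exact le_trans (ih h2) (le_max_right _ _)

theorem pvCell_bound {grid : List String} {r j : Int} {c : Char}
    (h : pvCell grid r j = some c) : -(pvBound grid) ≤ j ∧ j ≤ pvBound grid := by
  unfold pvCell at h
  cases hrow : PySem.List.pyGet? grid r with
  | none => rw [hrow] at h; cases h
  | some s =>
    rw [hrow] at h
    have hs : s ∈ grid := PySem.List.mem_of_pyGet?_eq_some grid hrow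
    have hlen : s.toList.length ≤ pvRowMax grid := pvRowMax_le hs
    have hc : PySem.List.pyGet? s.toList j = some c := h
    have hin : PySem.Raise.InRange s.toList.length j := by
      by_contra hni
      rw [← PySem.List.pyGet?_eq_none_iff] at hni
      rw [hni] at hc; cases hc
    obtain ⟨h1, h2⟩ := hin
    unfold pvBound
    omega

theorem pvPot_lt_skip (grid : List String) (v : List (Int × Int)) (x : Int × Int)
    (rest : List (Int × Int)) : pvPot grid v rest < pvPot grid v (x :: rest) := by
  unfold pvPot
  have hsub : (pvCand grid rest ∪ rest.toFinset) \ v.toFinset ⊆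
      (pvCand grid (x :: rest) ∪ (x :: rest).toFinset) \ v.toFinset := by
    intro p hp
    simp only [Finset.mem_sdiff, Finset.mem_union, List.mem_toFinset, mem_pvCand,
      List.map_cons, List.mem_cons] at hp ⊢
    tauto
  have := Finset.card_le_card hsub
  simp only [List.length_cons]
  omega

theorem pvPot_lt_step (grid : List String) (v : List (Int × Int)) (x : Int × Int)
    (rest s1 s2 : List (Int × Int)) (hx : x ∉ v)
    (hs1 : ∀ p ∈ s1, p.1 = x.1 ∧ -(pvBound grid) ≤ p.2 ∧ p.2 ≤ pvBound grid)
    (hs2 : ∀ p ∈ s2, p.1 = x.1 ∧ -(pvBound grid) ≤ p.2 ∧ p.2 ≤ pvBound grid)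
    (hl1 : s1.length ≤ 1) (hl2 : s2.length ≤ 1) :
    pvPot grid (v ++ [x]) (s2 ++ s1 ++ rest) < pvPot grid v (x :: rest) := by
  unfold pvPot
  have hxU : x ∈ (pvCand grid (x :: rest) ∪ (x :: rest).toFinset) \ v.toFinset := by
    rw [Finset.mem_sdiff, Finset.mem_union, List.mem_toFinset, List.mem_toFinset]
    exact ⟨Or.inr (List.mem_cons_self), fun h => hx h⟩
  have hsub : (pvCand grid (s2 ++ s1 ++ rest) ∪ (s2 ++ s1 ++ rest).toFinset) \
      (v ++ [x]).toFinset ⊆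
      ((pvCand grid (x :: rest) ∪ (x :: rest).toFinset) \ v.toFinset).erase x := by
    intro p hp
    rw [Finset.mem_sdiff] at hp
    obtain ⟨hpin, hpv⟩ := hp
    rw [List.mem_toFinset, List.mem_append, List.mem_singleton] at hpv
    have hp1 : p ∉ v := fun h => hpv (Or.inl h)
    have hp2 : p ≠ x := fun h => hpv (Or.inr h)
    rw [Finset.mem_erase, Finset.mem_sdiff, List.mem_toFinset]
    refine ⟨hp2, ?_, hp1⟩
    rw [Finset.mem_union] at hpin ⊢
    have hmem3 : ∀ q : Int × Int, q ∈ s2 ++ s1 ++ rest → (q ∈ s2 ∨ q ∈ s1 ∨ q ∈ rest) := by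
      intro q hq
      rw [List.mem_append, List.mem_append] at hq
      tauto
    rcases hpin with hc | hm
    · left
      rw [mem_pvCand] at hc ⊢
      obtain ⟨hc1, hc2, hc3⟩ := hc
      refine ⟨?_, hc2, hc3⟩
      rw [List.mem_map] at hc1
      obtain ⟨q, hq, hqe⟩ := hc1
      rw [List.map_cons, List.mem_cons]
      rcases hmem3 q hq with h | h | h
      · left; rw [← hqe]; exact (hs2 q h).1
      · left; rw [← hqe]; exact (hs1 q h).1
      · right; rw [← hqe]; exact List.mem_map_of_mem h
    · rw [List.mem_toFinset] at hm
      rcases hmem3 p hm with h | h | h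
      · left; rw [mem_pvCand]
        exact ⟨by rw [List.map_cons, List.mem_cons]; exact Or.inl (hs2 p h).1,
          (hs2 p h).2.1, (hs2 p h).2.2⟩
      · left; rw [mem_pvCand]
        exact ⟨by rw [List.map_cons, List.mem_cons]; exact Or.inl (hs1 p h).1,
          (hs1 p h).2.1, (hs1 p h).2.2⟩
      · right; rw [List.mem_toFinset, List.mem_cons]; exact Or.inr h
  have hcard := Finset.card_le_card hsub
  have herase := Finset.card_erase_of_mem hxU
  have hpos : 0 < ((pvCand grid (x :: rest) ∪ (x :: rest).toFinset) \ v.toFinset).card :=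
    Finset.card_pos.mpr ⟨x, hxU⟩
  simp only [List.length_append, List.length_cons]
  omega

def dfsLoop (grid : List String) (visited stack : List (Int × Int)) : List (Int × Int) :=
  match stack with
  | [] => visited
  | vtx :: rest =>
    if hv : vtx ∈ visited then dfsLoop grid visited rest
    else
      let s1 : List (Int × Int) :=
        if pvCell grid vtx.1 (vtx.2 + 1) = some '-' ∧ vtx.2 + 1 < 10 then [(vtx.1, vtx.2 + 1)] else []
      let s2 : List (Int × Int) :=
        if pvCell grid vtx.1 (vtx.2 - 1) = some '-' ∧ vtx.2 - 1 ≥ 0 then [(vtx.1, vtx.2 - 1)] else []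
      dfsLoop grid (PySem.Set.add visited vtx) (s2 ++ s1 ++ rest)
termination_by pvPot grid visited stack
decreasing_by
  · exact pvPot_lt_skip grid visited vtx rest
  · rw [PySem.Set.add_of_not_mem hv]
    apply pvPot_lt_step grid visited vtx rest _ _ hv
    · intro p hp
      split_ifs at hp with h
      · simp only [List.mem_singleton] at hp; subst hp
        exact ⟨rfl, (pvCell_bound h.1).1, (pvCell_bound h.1).2⟩
      · cases hp
    · intro p hp
      split_ifs at hp with h
      · simp only [List.mem_singleton] at hp; subst hp
        exact ⟨rfl, (pvCell_bound h.1).1, (pvCell_bound h.1).2⟩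
      · cases hp
    · split_ifs <;> simp
    · split_ifs <;> simp

def dfs_x (grid : List String) (start : Int × Int) : List (Int × Int) :=
  dfsLoop grid [] [start]

-- ===== PORT B =====
-- left while-loop of Source B: collects (r, j), (r, j-1), … while the cell is '-' and j ≥ 0

def scanL (grid : List String) (r : Int) (j : Int) : List (Int × Int) :=
  if pvCell grid r j = some '-' ∧ 0 ≤ j then (r, j) :: scanL grid r (j - 1) else []
termination_by (j + 1).toNat
decreasing_by omega

-- right while-loop of Source B: collects (r, j), (r, j+1), … while the cell is '-' and j < 10

def scanR (grid : List String) (r : Int) (j : Int) : List (Int × Int) :=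
  if pvCell grid r j = some '-' ∧ j < 10 then (r, j) :: scanR grid r (j + 1) else []
termination_by (10 - j).toNat
decreasing_by omega

def dfs_x_alt (grid : List String) (start : Int × Int) : List (Int × Int) :=
  PySem.Set.ofList
    (start :: scanL grid start.1 (start.2 - 1) ++ scanR grid start.1 (start.2 + 1))

-- ===== PRECONDITION & SPEC =====
def Spec_dfs_x (grid : List String) (start : Int × Int) (out : List (Int × Int)) : Prop := out = dfs_x_alt grid start
instance (grid : List String) (start : Int × Int) (out : List (Int × Int)) : Decidable (Spec_dfs_x grid start out) := by unfold Spec_dfs_x; infer_instance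

-- ===== CLAIM (what is proved, stated in full; the proofs are below) =====
def Claim_equal_dfs_x : Prop := ∀ (grid : List String) (start : Int × Int), Dom_dfs_x grid start → Spec_dfs_x grid start (dfs_x grid start)

-- ===== LEMMAS AND PROOFS =====

theorem scanL_memN (grid : List String) (r : Int) :
    ∀ (n : Nat) (j : Int), (j + 1).toNat ≤ n →
      ∀ p ∈ scanL grid r j, p.1 = r ∧ 0 ≤ p.2 ∧ p.2 ≤ j := by
  intro n
  induction n with
  | zero =>
    intro j hj p hp
    rw [scanL, if_neg (by omega : ¬(pvCell grid r j = some '-' ∧ 0 ≤ j))] at hp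
    cases hp
  | succ n ih =>
    intro j hj p hp
    rw [scanL] at hp
    split_ifs at hp with hc
    · rcases List.mem_cons.mp hp with he | ht
      · subst he; exact ⟨rfl, hc.2, le_refl _⟩
      · have h3 := ih (j - 1) (by omega) p ht
        exact ⟨h3.1, h3.2.1, by omega⟩
    · cases hp

theorem scanL_mem {grid : List String} {r j : Int} {p : Int × Int}
    (h : p ∈ scanL grid r j) : p.1 = r ∧ 0 ≤ p.2 ∧ p.2 ≤ j :=
  scanL_memN grid r (j + 1).toNat j le_rfl p h

theorem scanR_memN (grid : List String) (r : Int) :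
    ∀ (n : Nat) (j : Int), (10 - j).toNat ≤ n →
      ∀ p ∈ scanR grid r j, p.1 = r ∧ j ≤ p.2 := by
  intro n
  induction n with
  | zero =>
    intro j hj p hp
    rw [scanR, if_neg (by omega : ¬(pvCell grid r j = some '-' ∧ j < 10))] at hp
    cases hp
  | succ n ih =>
    intro j hj p hp
    rw [scanR] at hp
    split_ifs at hp with hc
    · rcases List.mem_cons.mp hp with he | ht
      · subst he; exact ⟨rfl, le_refl _⟩
      · have h3 := ih (j + 1) (by omega) p ht
        exact ⟨h3.1, by omega⟩
    · cases hp

theorem scanR_mem {grid : List String} {r j : Int} {p : Int × Int}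
    (h : p ∈ scanR grid r j) : p.1 = r ∧ j ≤ p.2 :=
  scanR_memN grid r (10 - j).toNat j le_rfl p h

theorem scanL_nodupN (grid : List String) (r : Int) :
    ∀ (n : Nat) (j : Int), (j + 1).toNat ≤ n → (scanL grid r j).Nodup := by
  intro n
  induction n with
  | zero =>
    intro j hj
    rw [scanL, if_neg (by omega : ¬(pvCell grid r j = some '-' ∧ 0 ≤ j))]
    exact List.nodup_nil
  | succ n ih =>
    intro j hj
    rw [scanL]
    split_ifs with hc
    · refine List.Nodup.cons (fun hmem => ?_) (ih (j - 1) (by omega))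
      have := (scanL_mem hmem).2.2
      omega
    · exact List.nodup_nil

theorem scanL_nodup (grid : List String) (r j : Int) : (scanL grid r j).Nodup :=
  scanL_nodupN grid r (j + 1).toNat j le_rfl

theorem scanR_nodupN (grid : List String) (r : Int) :
    ∀ (n : Nat) (j : Int), (10 - j).toNat ≤ n → (scanR grid r j).Nodup := by
  intro n
  induction n with
  | zero =>
    intro j hj
    rw [scanR, if_neg (by omega : ¬(pvCell grid r j = some '-' ∧ j < 10))]
    exact List.nodup_nil
  | succ n ih =>
    intro j hj
    rw [scanR]
    split_ifs with hc
    · refine List.Nodup.cons (fun hmem => ?_) (ih (j + 1) (by omega))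
      have := (scanR_mem hmem).2
      omega
    · exact List.nodup_nil

theorem scanR_nodup (grid : List String) (r j : Int) : (scanR grid r j).Nodup :=
  scanR_nodupN grid r (10 - j).toNat j le_rfl

theorem dfsLoop_skip {grid : List String} {v : List (Int × Int)}
    (junk rest : List (Int × Int)) (h : ∀ x ∈ junk, x ∈ v) :
    dfsLoop grid v (junk ++ rest) = dfsLoop grid v rest := by
  induction junk with
  | nil => rfl
  | cons x xs ih =>
    rw [List.cons_append, dfsLoop, dif_pos (h x List.mem_cons_self)]
    exact ih (fun y hy => h y (List.mem_cons_of_mem x hy))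

theorem dfsLoop_right (grid : List String) (r : Int) :
    ∀ (n : Nat) (j : Int) (v rest : List (Int × Int)), (10 - j).toNat ≤ n →
    pvCell grid r j = some '-' → j < 10 → (r, j - 1) ∈ v →
    (∀ k : Int, j ≤ k → (r, k) ∉ v) → (∀ x ∈ rest, x ∈ v) →
    dfsLoop grid v ((r, j) :: rest) = v ++ scanR grid r j := by
  intro n
  induction n with
  | zero => intro j v rest hn hcell hlt _ _ _; omega
  | succ n ih =>
    intro j v rest hn hcell hlt hprev hfresh hrest
    have hnv : (r, j) ∉ v := hfresh j le_rfl
    rw [dfsLoop, dif_neg hnv]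
    simp only
    rw [PySem.Set.add_of_not_mem hnv]
    set s1 := if pvCell grid r (j + 1) = some '-' ∧ j + 1 < 10 then [(r, j + 1)] else [] with hs1
    set s2 := if pvCell grid r (j - 1) = some '-' ∧ j - 1 ≥ 0 then [(r, j - 1)] else [] with hs2
    have hR : scanR grid r j = (r, j) :: scanR grid r (j + 1) := by
      rw [scanR, if_pos ⟨hcell, hlt⟩]
    have hs2v : ∀ x ∈ s2, x ∈ v ++ [(r, j)] := by
      intro x hx
      rw [hs2] at hx
      split_ifs at hx with h2
      · rw [List.mem_singleton] at hx; subst hx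
        exact List.mem_append_left _ hprev
      · cases hx
    rw [List.append_assoc, dfsLoop_skip s2 (s1 ++ rest) hs2v]
    by_cases hc1 : pvCell grid r (j + 1) = some '-' ∧ j + 1 < 10
    · rw [hs1, if_pos hc1, List.singleton_append]
      rw [ih (j + 1) (v ++ [(r, j)]) rest (by omega) hc1.1 hc1.2
        (List.mem_append_right _ (by norm_num))
        (fun k hk => by
          rw [List.mem_append, List.mem_singleton]
          rintro (h | h)
          · exact hfresh k (by omega) h
          · have : k = j := by injection h with h1 h2
            omega)
        (fun x hx => List.mem_append_left _ (hrest x hx))]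
      rw [hR, List.append_assoc, List.singleton_append]
    · rw [hs1, if_neg hc1, List.nil_append]
      rw [← List.append_nil rest, dfsLoop_skip rest []
        (fun x hx => List.mem_append_left _ (hrest x hx))]
      rw [hR]
      rw [scanR, if_neg hc1, dfsLoop]

theorem dfsLoop_left (grid : List String) (r : Int) :
    ∀ (n : Nat) (j : Int) (v rest : List (Int × Int)), (j + 1).toNat ≤ n →
    pvCell grid r j = some '-' → 0 ≤ j → (r, j + 1) ∈ v →
    (∀ k : Int, k ≤ j → (r, k) ∉ v) →
    dfsLoop grid v ((r, j) :: rest) = dfsLoop grid (v ++ scanL grid r j) rest := by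
  intro n
  induction n with
  | zero => intro j v rest hn _ hge _ _; omega
  | succ n ih =>
    intro j v rest hn hcell hge hprev hfresh
    have hnv : (r, j) ∉ v := hfresh j le_rfl
    rw [dfsLoop, dif_neg hnv]
    simp only
    rw [PySem.Set.add_of_not_mem hnv]
    set s1 := if pvCell grid r (j + 1) = some '-' ∧ j + 1 < 10 then [(r, j + 1)] else [] with hs1
    set s2 := if pvCell grid r (j - 1) = some '-' ∧ j - 1 ≥ 0 then [(r, j - 1)] else [] with hs2
    have hL : scanL grid r j = (r, j) :: scanL grid r (j - 1) := by
      rw [scanL, if_pos ⟨hcell, hge⟩]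
    have hs1v : ∀ x ∈ s1, x ∈ v ++ [(r, j)] := by
      intro x hx
      rw [hs1] at hx
      split_ifs at hx with h1
      · rw [List.mem_singleton] at hx; subst hx
        exact List.mem_append_left _ hprev
      · cases hx
    rw [List.append_assoc]
    by_cases hc2 : pvCell grid r (j - 1) = some '-' ∧ j - 1 ≥ 0
    · rw [hs2, if_pos hc2, List.singleton_append]
      rw [ih (j - 1) (v ++ [(r, j)]) (s1 ++ rest) (by omega) hc2.1 (by omega)
        (List.mem_append_right _ (by norm_num))
        (fun k hk => by
          rw [List.mem_append, List.mem_singleton]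
          rintro (h | h)
          · exact hfresh k (by omega) h
          · have : k = j := by injection h with h1 h2
            omega)]
      rw [dfsLoop_skip s1 rest (fun x hx => List.mem_append_left _ (hs1v x hx))]
      rw [hL]
      rw [show v ++ (r, j) :: scanL grid r (j - 1) = (v ++ [(r, j)]) ++ scanL grid r (j - 1) by simp]
    · rw [hs2, if_neg hc2, List.nil_append]
      rw [dfsLoop_skip s1 rest hs1v]
      rw [hL, scanL, if_neg hc2]

theorem dfs_x_run (grid : List String) (r c : Int) :
    dfs_x grid (r, c) =
      (r, c) :: (scanL grid r (c - 1) ++ scanR grid r (c + 1)) := by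
  unfold dfs_x
  rw [dfsLoop, dif_neg List.not_mem_nil]
  simp only
  rw [PySem.Set.add_of_not_mem List.not_mem_nil, List.nil_append]
  set s1 := if pvCell grid r (c + 1) = some '-' ∧ c + 1 < 10 then [(r, c + 1)] else [] with hs1
  set s2 := if pvCell grid r (c - 1) = some '-' ∧ c - 1 ≥ 0 then [(r, c - 1)] else [] with hs2
  rw [List.append_nil]
  have hstep : dfsLoop grid [(r, c)] (s2 ++ s1) =
      dfsLoop grid ([(r, c)] ++ scanL grid r (c - 1)) s1 := by
    by_cases hcL : pvCell grid r (c - 1) = some '-' ∧ c - 1 ≥ 0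
    · rw [hs2, if_pos hcL, List.singleton_append]
      exact dfsLoop_left grid r (c - 1 + 1).toNat (c - 1) [(r, c)] s1 le_rfl hcL.1 (by omega)
        (by norm_num)
        (fun k hk => by
          rw [List.mem_singleton]
          intro h
          have : k = c := by injection h with h1 h2
          omega)
    · rw [hs2, if_neg hcL, List.nil_append, scanL, if_neg hcL, List.append_nil]
  rw [hstep]
  by_cases hcR : pvCell grid r (c + 1) = some '-' ∧ c + 1 < 10
  · rw [hs1, if_pos hcR]
    rw [show ([(r, c + 1)] : List (Int × Int)) = (r, c + 1) :: [] from rfl]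
    rw [dfsLoop_right grid r (10 - (c + 1)).toNat (c + 1) _ [] le_rfl hcR.1 hcR.2
      (by norm_num)
      (fun k hk => by
        rw [List.mem_append, List.mem_singleton]
        rintro (h | h)
        · have : k = c := by injection h with h1 h2
          omega
        · have := scanL_mem h
          omega)
      (fun x hx => by cases hx)]
    simp
  · rw [hs1, if_neg hcR, dfsLoop, scanR, if_neg hcR, List.append_nil]
    simp

theorem dfs_x_alt_run (grid : List String) (r c : Int) :
    dfs_x_alt grid (r, c) =
      (r, c) :: (scanL grid r (c - 1) ++ scanR grid r (c + 1)) := by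
  unfold dfs_x_alt
  apply PySem.Set.ofList_eq_self_of_nodup
  refine List.Nodup.cons ?_ (List.Nodup.append (scanL_nodup grid r (c - 1)) (scanR_nodup grid r (c + 1)) ?_)
  · intro hmem
    rcases List.mem_append.mp hmem with h | h
    · have := scanL_mem h; omega
    · have := scanR_mem h; omega
  · intro x hxl hxr
    have h1 := scanL_mem hxl
    have h2 := scanR_mem hxr
    omega

-- ===== VERDICT (by name: the statement is the Claim_ definition above) =====
theorem dfs_x_spec : Claim_equal_dfs_x := by
  intro grid start _
  unfold Spec_dfs_x
  obtain ⟨r, c⟩ := start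
  rw [dfs_x_run, dfs_x_alt_run]
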